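-- pv_equiv track=rewrite | github.com/allinne/advent2023 | 03b.py | right_number
-- ===== SOURCE A (Python) =====
-- digits ='1234567890'
--
-- def right_number(x, y, lines):
--     '''
--     >>> right_number(3, 4, small)
--     0
--
--     >>> right_number(4, 1, lines)
--     609
--     '''
--     n = 0
--     x1 = x + 1
--     s = ''
--     while x1 < len(lines[0]) and digits.find(lines[y][x1]) > -1:
--         s += lines[y][x1]
--         x1 += 1
--     if s:
--         n = int(s)
--     return n
-- ===== SOURCE B (Python) =====
-- DIGITS = "0123456789"
--
-- def right_number(x, y, lines):
--     # Cut out the bounded segment first, then strip the leading digit run off it: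
--     # the run is the part of seg that lstrip removed.
--     seg = lines[y][x + 1:len(lines[0])]
--     rest = seg.lstrip(DIGITS)
--     return int(seg[:len(seg) - len(rest)]) if rest != seg else 0
-- ===== Notes on version B (the rewrite author's own statement) =====
-- stated objective: idiomatic
-- what changed: Instead of a character-by-character while loop with explicit bound checks that accumulates a string, B slices the bounded segment lines[y][x+1:len(lines[0])] once and obtains the leading digit run as the part removed by seg.lstrip('0123456789').
-- outside the precondition, e.g. on right_number(-3, 0, ['12']): A returns 1212, B returns 12; on right_number(0, 1, ['abcd', '12']): A raises IndexError, B returns 2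
import Mathlib
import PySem

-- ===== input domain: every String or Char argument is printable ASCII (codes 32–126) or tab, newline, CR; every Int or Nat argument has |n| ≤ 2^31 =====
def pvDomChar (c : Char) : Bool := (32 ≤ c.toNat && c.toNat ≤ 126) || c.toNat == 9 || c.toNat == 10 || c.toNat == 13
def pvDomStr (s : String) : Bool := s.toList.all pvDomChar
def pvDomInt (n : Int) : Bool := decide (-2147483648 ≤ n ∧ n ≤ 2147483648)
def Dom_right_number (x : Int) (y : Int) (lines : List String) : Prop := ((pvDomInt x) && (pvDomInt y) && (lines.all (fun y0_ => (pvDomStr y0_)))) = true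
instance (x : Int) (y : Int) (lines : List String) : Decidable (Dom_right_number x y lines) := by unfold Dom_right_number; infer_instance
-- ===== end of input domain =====

-- B replaces A's character-by-character accumulating while loop by one bounded slice whose
-- leading digit run is read off with lstrip (objective: idiomatic).  Equal return values on Pre_.

-- ===== PORT A =====
-- digits = '1234567890'
def pvDigitsA : List Char := "1234567890".toList

-- the while loop of A: state (x1, s); lines[y][x1] is pyGetD with a non-digit default, exact on
-- Pre_ (which excludes the IndexError runs).
def pvGoA (bound : Int) (row : List Char) (x1 : Int) (s : List Char) : List Char :=
  if _h : x1 < bound ∧ PySem.Chars.find pvDigitsA [PySem.List.pyGetD row x1 ' '] > -1 then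
    pvGoA bound row (x1 + 1) (s ++ [PySem.List.pyGetD row x1 ' '])
  else s
termination_by (bound - x1).toNat
decreasing_by omega

def right_number (x : Int) (y : Int) (lines : List String) : Int :=
  let x1 := x + 1
  let s := pvGoA ((PySem.Str.len (PySem.List.pyGetD lines 0 "") : Int)) (PySem.List.pyGetD lines y "").toList x1 []
  -- int(s): s is a nonempty digit string whenever this branch is taken, so ofChars? is some
  if s ≠ [] then (PySem.Int.ofChars? s).getD 0 else 0

-- ===== PORT B =====
def pvDIGITS : List Char := "0123456789".toList

def right_number_alt (x : Int) (y : Int) (lines : List String) : Int :=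
  let seg := PySem.List.slice (PySem.List.pyGetD lines y "").toList (some (x + 1))
              (some ((PySem.Str.len (PySem.List.pyGetD lines 0 "") : Int)))
  let rest := seg.dropWhile (fun c => decide (c ∈ pvDIGITS))   -- seg.lstrip(DIGITS), hand-ported: exact
  if rest ≠ seg then (PySem.Int.ofChars? (seg.take (seg.length - rest.length))).getD 0 else 0

-- ===== PRECONDITION & SPEC =====
-- Pre_ restricts to the puzzle's natural grid domain on x (x+1 ≥ 0: for x+1 < 0 A's scan starts
-- from Python's negative-index wraparound at the row's end, meaningless for a grid read), and
-- excludes the inputs where A raises IndexError: empty lines, row index y out of range, and a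
-- digit run that reaches the end of a row shorter than row 0.
def Pre_right_number (x : Int) (y : Int) (lines : List String) : Prop :=
  lines ≠ [] ∧ PySem.Raise.InRange lines.length y ∧ 0 ≤ x + 1 ∧
  ¬ ((PySem.List.pyGetD lines y "").toList.length < (lines.headD "").toList.length ∧
     x + 1 < ((lines.headD "").toList.length : Int) ∧
     ((PySem.List.pyGetD lines y "").toList.drop (x + 1).toNat).all (fun c => decide (c ∈ "0123456789".toList)))
instance (x : Int) (y : Int) (lines : List String) : Decidable (Pre_right_number x y lines) := by
  unfold Pre_right_number; infer_instance

def pvWitness_right_number : Int × Int × List String := (3, 1, ["467..114..", ".....609.."])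

def Spec_right_number (x : Int) (y : Int) (lines : List String) (out : Int) : Prop := out = right_number_alt x y lines
instance (x : Int) (y : Int) (lines : List String) (out : Int) : Decidable (Spec_right_number x y lines out) := by unfold Spec_right_number; infer_instance

-- ===== CLAIM (what is proved, stated in full; the proofs are below) =====
def Claim_equal_right_number : Prop := ∀ (x : Int) (y : Int) (lines : List String), Dom_right_number x y lines → Pre_right_number x y lines → Spec_right_number x y lines (right_number x y lines)

-- ===== LEMMAS AND PROOFS =====

-- A's digit test agrees with B's membership test, character by character.
lemma pvDigit_eq (c : Char) :
    (PySem.Chars.find pvDigitsA [c] > -1) ↔ c ∈ pvDIGITS := by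
  have h1 : pvDigitsA = ['1','2','3','4','5','6','7','8','9','0'] := by decide
  have h2 : pvDIGITS = ['0','1','2','3','4','5','6','7','8','9'] := by decide
  rw [gt_iff_lt, show (-1 : Int) < PySem.Chars.find pvDigitsA [c] ↔ 0 ≤ PySem.Chars.find pvDigitsA [c] by omega]
  rw [PySem.Chars.find_nonneg_iff, List.singleton_infix_iff, h1, h2]
  simp only [List.mem_cons, List.not_mem_nil, or_false]
  tauto

-- The loop computes the leading digit run of the bounded segment.
lemma pvGoA_eq (n : Nat) : ∀ (b : Nat) (row : List Char) (k : Nat) (s : List Char), b - k ≤ n →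
    pvGoA (b : Int) row (k : Int) s
      = s ++ ((row.drop k).take (b - k)).takeWhile (fun c => decide (c ∈ pvDIGITS)) := by
  induction n with
  | zero =>
    intro b row k s h
    rw [pvGoA, dif_neg (by intro hco; have := hco.1; omega)]
    simp [Nat.sub_eq_zero_of_le (by omega : b ≤ k)]
  | succ n ih =>
    intro b row k s h
    rw [pvGoA]
    by_cases hkb : (k : Int) < (b : Int)
    · have hkb' : k < b := by exact_mod_cast hkb
      have hget : PySem.List.pyGetD row (k : Int) ' ' = row.getD k ' ' := by simp
      by_cases hlen : k < row.length
      · have hgd : row.getD k ' ' = row[k] := List.getD_eq_getElem row ' ' hlen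
        have hdrop : row.drop k = row[k] :: row.drop (k + 1) := List.drop_eq_getElem_cons hlen
        have hbk : b - k = (b - (k + 1)) + 1 := by omega
        by_cases hdig : row[k] ∈ pvDIGITS
        · rw [dif_pos ⟨hkb, by rw [hget, hgd]; exact (pvDigit_eq _).mpr hdig⟩]
          have hc : (k : Int) + 1 = ((k + 1 : Nat) : Int) := by push_cast; ring
          rw [hget, hgd, hc, ih b row (k + 1) _ (by omega)]
          rw [hdrop, hbk, List.take_succ_cons,
              List.takeWhile_cons_of_pos (by simpa using hdig)]
          simp
        · rw [dif_neg (by rintro ⟨-, hfind⟩; rw [hget, hgd] at hfind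
                          exact hdig ((pvDigit_eq _).mp hfind))]
          rw [hdrop, hbk, List.take_succ_cons,
              List.takeWhile_cons_of_neg (by simpa using hdig)]
          simp
      · have hgd : row.getD k ' ' = ' ' := List.getD_eq_default row ' ' (by omega)
        rw [dif_neg (by rintro ⟨-, hfind⟩; rw [hget, hgd] at hfind
                        exact absurd ((pvDigit_eq ' ').mp hfind) (by decide))]
        have hnil : row.drop k = [] := List.drop_eq_nil_of_le (by omega)
        simp [hnil]
    · rw [dif_neg (fun hco => hkb hco.1)]
      have : b - k = 0 := by omega
      simp [this]

-- lstrip arithmetic: the removed part is the takeWhile prefix, and 'rest ≠ seg' detects it nonempty.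
lemma pvWrap (l : List Char) (p : Char → Bool) :
    (if l.takeWhile p ≠ [] then (PySem.Int.ofChars? (l.takeWhile p)).getD 0 else 0)
      = (if l.dropWhile p ≠ l then
           (PySem.Int.ofChars? (l.take (l.length - (l.dropWhile p).length))).getD 0 else 0) := by
  set tw := l.takeWhile p with htw'
  set dw := l.dropWhile p with hdw'
  have hsplit : tw ++ dw = l := List.takeWhile_append_dropWhile
  have hlen : l.length = tw.length + dw.length := by
    have := congrArg List.length hsplit
    simpa using this.symm
  have htake : l.take (l.length - dw.length) = tw := by
    rw [show l.length - dw.length = tw.length from by omega, ← hsplit]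
    exact List.take_left
  rcases eq_or_ne tw [] with htw | htw
  · have hdw : dw = l := by rw [← hsplit, htw, List.nil_append]
    simp [htw, hdw]
  · have hdw : dw ≠ l := by
      intro hdw
      apply htw
      have : dw.length = l.length := by rw [hdw]
      exact List.eq_nil_of_length_eq_zero (by omega)
    simp [htw, hdw, htake]

-- ===== VERDICT (by name: the statement is the Claim_ definition above) =====
theorem right_number_spec : Claim_equal_right_number := by
  intro x y lines _ hpre
  obtain ⟨-, -, hx1, -⟩ := hpre
  unfold Spec_right_number
  simp only [right_number, right_number_alt, PySem.Str.len_eq]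
  have ha : x + 1 = (((x + 1).toNat : Nat) : Int) := (Int.toNat_of_nonneg hx1).symm
  rw [ha, pvGoA_eq (PySem.List.pyGetD lines 0 "").toList.length _ _ _ _ (by omega),
      PySem.List.slice_natCast]
  simp only [List.nil_append]
  exact pvWrap _ _
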